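-- pv_equiv track=rewrite | github.com/YavuzBozkurt/HackerRank | Backtracking Monke/prime xor/prime.py | XorBacktrack
-- ===== SOURCE A (Python) =====
-- from collections import Counter
--
-- def isPrime(val):
--     if val < 2:
--         return False
--
--     for number in range(2, val):
--         # if val is divisible by number, then val is not prime
--         if val % number == 0:
--             return False
--
--     # all checks passed, thus, val is prime
--     return True
--
-- def xorIsPrime(solutions, multiset, a):
--
--     for element in solutions:
--         count1 = Counter(element)
--         count2 = Counter(multiset)
--         if count1 == count2:
--             return False
--
--     considered = [val for val in a]
--     for i in range(len(multiset)):
--         if multiset[i] in considered: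
--             considered[considered.index(multiset[i])] = -1000000000
--         else:
--             return False
--
--     xor_result = 0
--     for value in multiset:
--         xor_result = xor_result ^ value
--
--     if isPrime(xor_result):
--         return True
--     else:
--         return False
--
-- def XorBacktrack(n, a, multiset, solutions, cur):
--
--     if len(multiset) >= 1:
--         if xorIsPrime(solutions, multiset, a):
--             solutions.append([x for x in multiset])
--             cur += 1
--         else:
--             cur += 0
--
--     # base case
--     if len(a) == len(multiset):
--         return cur
--
--     for i in range(len(a)):
--         multiset.append(a[i])
--         cur = XorBacktrack(n, a, multiset, solutions, cur)
--         del multiset[-1]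
--
--     return cur % (10**9 + 7)
-- ===== SOURCE B (Python) =====
-- from collections import Counter
--
-- # Iterative explicit-stack version of the search; the count is reduced mod 10**9+7
-- # once at the end. Return value only: the arguments are left unmutated.
-- def XorBacktrack(n, a, multiset, solutions, cur):
--     MOD = 10 ** 9 + 7
--     la = len(a)
--
--     def is_prime(val):
--         if val < 2:
--             return False
--         for number in range(2, val):
--             if val % number == 0:
--                 return False
--         return True
--
--     def qualifies(sols, m):
--         for element in sols:
--             if Counter(element) == Counter(m):
--                 return False
--         considered = list(a)
--         for v in m:
--             if v in considered:
--                 considered[considered.index(v)] = -1000000000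
--             else:
--                 return False
--         x = 0
--         for v in m:
--             x ^= v
--         return is_prime(x)
--
--     sols = list(solutions)
--     stack = [list(multiset)]
--     while stack:
--         m = stack.pop()
--         if len(m) >= 1 and qualifies(sols, m):
--             sols.append(list(m))
--             cur += 1
--         if len(m) < la:
--             for x in reversed(a):
--                 stack.append(m + [x])
--     return cur % MOD
-- ===== Notes on version B (the rewrite author's own statement) =====
-- stated objective: alternative
-- what changed: A's recursive backtracking (with in-place multiset/solutions mutation and a per-level modulus) is replaced by an iterative explicit-stack worklist that threads the count unmodded and reduces it mod 10**9+7 once at the end; B leaves its arguments unmutated (A appends the found solutions to `solutions` in place).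
-- intended difference: On calls whose initial multiset already has full length len(a) and whose resulting count (cur, plus 1 iff that multiset qualifies as a new prime-XOR sub-multiset) lies outside [0, 10**9+7), A returns the count unreduced because its base case returns before the final modulus (e.g. -2 on the witness) while B returns it reduced mod 10**9+7 (1000000005); the reduction is the intended behaviour everywhere. — e.g. on XorBacktrack(0, [1], [1], [], -2): A returns -2, B returns 1000000005
import Mathlib
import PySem

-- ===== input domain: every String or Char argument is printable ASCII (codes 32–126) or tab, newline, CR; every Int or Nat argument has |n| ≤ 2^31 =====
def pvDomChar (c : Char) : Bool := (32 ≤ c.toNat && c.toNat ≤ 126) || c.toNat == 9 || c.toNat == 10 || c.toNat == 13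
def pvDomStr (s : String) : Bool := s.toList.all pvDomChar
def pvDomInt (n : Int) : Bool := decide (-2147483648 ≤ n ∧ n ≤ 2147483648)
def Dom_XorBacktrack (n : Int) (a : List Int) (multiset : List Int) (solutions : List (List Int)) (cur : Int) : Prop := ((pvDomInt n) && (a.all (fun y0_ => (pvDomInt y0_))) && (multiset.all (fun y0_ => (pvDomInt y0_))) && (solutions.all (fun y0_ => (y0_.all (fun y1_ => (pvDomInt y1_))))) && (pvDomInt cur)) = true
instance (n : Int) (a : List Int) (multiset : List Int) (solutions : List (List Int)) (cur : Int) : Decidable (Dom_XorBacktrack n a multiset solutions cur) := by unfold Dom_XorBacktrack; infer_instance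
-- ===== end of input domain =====

-- B replaces A's recursive backtracking by an explicit-stack worklist with a single final
-- modulus (objective: alternative control structure, same search); return value only —
-- A appends the found solutions to `solutions` in place, B leaves its arguments unmutated.

-- ===== PORT A =====
-- helpers shared by the two ports: Source A's isPrime/xorIsPrime and Source B's inner
-- is_prime/qualifies are the identical checking code, ported once.

-- `for number in range(2, val): if val % number == 0: return False` — fuel = number of
-- range elements, (val-2).toNat, exactly Python's iteration count.
def isPrimeAux (val : Int) : Nat → Int → Bool
  | 0, _ => true
  | fuel + 1, number =>
      if PySem.Int.mod val number == 0 then false else isPrimeAux val fuel (number + 1)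

def isPrimeP (val : Int) : Bool :=
  if val < 2 then false else isPrimeAux val (val - 2).toNat 2

-- the `considered` loop: replace the first occurrence by -1000000000, else return False
def consumeP : List Int → List Int → Bool
  | [], _ => true
  | v :: rest, considered =>
      if considered.contains v then consumeP rest (considered.replace v (-1000000000))
      else false

-- Counter(e) == Counter(m) is multiset equality of lists, i.e. List.isPerm (exact)
def xorIsPrimeP (sols : List (List Int)) (m a : List Int) : Bool :=
  if sols.any (fun e => e.isPerm m) then false
  else if consumeP m a then isPrimeP (m.foldl (fun x v => PySem.Int.bxor x v) 0)
  else false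

-- A's recursion; Python mutates `multiset`/`solutions` and returns cur, so the port
-- threads (cur, solutions). `for i in range(len(a)): multiset.append(a[i]); cur = rec…`
-- is the foldl over a. Fuel bounds the recursion depth; it never runs out when
-- multiset.length ≤ a.length (Python otherwise hits RecursionError — excluded by Pre_).
def goA (a : List Int) (fuel : Nat) (m : List Int) (sols : List (List Int)) (cur : Int) :
    Int × List (List Int) :=
  let cs : List (List Int) × Int :=
    if 1 ≤ m.length then
      (if xorIsPrimeP sols m a then (sols ++ [m], cur + 1) else (sols, cur))
    else (sols, cur)
  if m.length = a.length then (cs.2, cs.1)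
  else
    match fuel with
    | 0 => (cs.2, cs.1)   -- fuel exhausted: unreachable under Pre_
    | fuel' + 1 =>
      let st := a.foldl (fun (st : Int × List (List Int)) x => goA a fuel' (m ++ [x]) st.2 st.1)
        (cs.2, cs.1)
      (PySem.Int.mod st.1 1000000007, st.2)

def XorBacktrack (n : Int) (a : List Int) (multiset : List Int) (solutions : List (List Int)) (cur : Int) : Int :=
  (goA a (a.length + 1) multiset solutions cur).1

-- ===== PORT B =====
-- Source B's `stack` grows at the right and pops from the right; Python pushes reversed(a),
-- so the popped order is a's order: the Lean stack is the reversed Python list (head = top)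
-- and pushing is prepending a.map (fun x => m ++ [x]).
-- stackW bounds the number of loop iterations; it is only a totality guard (fuel):
-- the while loop itself never exhausts it.
def stackW (a : List Int) (st : List (List Int)) : Nat :=
  (st.map (fun m => (a.length + 2) ^ (a.length + 1 - m.length))).sum

def runBF (a : List Int) : Nat → List (List Int) → List (List Int) → Int → Int
  | 0, _, _, cur => cur   -- fuel exhausted: never reached (fuel starts above the measure)
  | fuel + 1, stack, sols, cur =>
    match stack with
    | [] => cur
    | m :: rest =>
      let p : List (List Int) × Int :=
        if 1 ≤ m.length ∧ xorIsPrimeP sols m a = true then (sols ++ [m], cur + 1)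
        else (sols, cur)
      if m.length < a.length then
        runBF a fuel (a.map (fun x => m ++ [x]) ++ rest) p.1 p.2
      else runBF a fuel rest p.1 p.2

def XorBacktrack_alt (n : Int) (a : List Int) (multiset : List Int) (solutions : List (List Int)) (cur : Int) : Int :=
  PySem.Int.mod (runBF a (stackW a [multiset] + 1) [multiset] solutions cur) 1000000007

-- ===== PRECONDITION & SPEC =====
-- Pre_ excludes exactly the inputs on which A overflows the recursion stack
-- (RecursionError): a nonempty with multiset longer than a.
def Pre_XorBacktrack (n : Int) (a : List Int) (multiset : List Int) (solutions : List (List Int)) (cur : Int) : Prop :=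
  a = [] ∨ multiset.length ≤ a.length
instance (n : Int) (a : List Int) (multiset : List Int) (solutions : List (List Int)) (cur : Int) : Decidable (Pre_XorBacktrack n a multiset solutions cur) := by unfold Pre_XorBacktrack; infer_instance

def pvWitness_XorBacktrack : Int × List Int × List Int × List (List Int) × Int :=
  (2, [1, 2], [], [], 0)

-- QualP: the input multiset qualifies to be counted — nonempty, no permutation of it
-- already recorded in solutions, a sub-multiset of a (with A's -1000000000 sentinel rule:
-- occurrences of -1000000000 need only one of "-1000000000 ∈ a" or "a non-sentinel first
-- element"), and its XOR prime. A closed-form condition on the input.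
def QualP (a : List Int) (multiset : List Int) (solutions : List (List Int)) : Prop :=
  multiset ≠ [] ∧ (∀ e ∈ solutions, ¬ List.Perm e multiset) ∧
  (∀ v ∈ multiset, v ≠ -1000000000 → multiset.count v ≤ a.count v) ∧
  ((-1000000000) ∈ multiset → ((-1000000000) ∈ a ∨ multiset.head? ≠ some (-1000000000))) ∧
  2 ≤ multiset.foldl (fun x v => PySem.Int.bxor x v) 0 ∧
  Nat.Prime (multiset.foldl (fun x v => PySem.Int.bxor x v) 0).toNat

-- On calls whose initial multiset already has full length len(a) and whose resulting count
-- (cur, plus 1 iff that multiset qualifies) lies outside [0, 10^9+7), A returns the count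
-- unreduced (its base case returns before the final modulus) while B returns it reduced
-- mod 10^9+7, the reduction being the intended behaviour everywhere.
def D_XorBacktrack (n : Int) (a : List Int) (multiset : List Int) (solutions : List (List Int)) (cur : Int) : Prop :=
  multiset.length = a.length ∧
  (QualP a multiset solutions → (cur + 1 < 0 ∨ 1000000007 ≤ cur + 1)) ∧
  (¬ QualP a multiset solutions → (cur < 0 ∨ 1000000007 ≤ cur))
instance (n : Int) (a : List Int) (multiset : List Int) (solutions : List (List Int)) (cur : Int) : Decidable (D_XorBacktrack n a multiset solutions cur) := by unfold D_XorBacktrack QualP; infer_instance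

def Spec_XorBacktrack (n : Int) (a : List Int) (multiset : List Int) (solutions : List (List Int)) (cur : Int) (out : Int) : Prop := ¬ D_XorBacktrack n a multiset solutions cur → out = XorBacktrack_alt n a multiset solutions cur
instance (n : Int) (a : List Int) (multiset : List Int) (solutions : List (List Int)) (cur : Int) (out : Int) : Decidable (Spec_XorBacktrack n a multiset solutions cur out) := by unfold Spec_XorBacktrack; infer_instance

def pvDiffWitness_XorBacktrack : Int × List Int × List Int × List (List Int) × Int :=
  (0, [1], [1], [], -2)
def pvDiffWitnessOut_XorBacktrack : Int × Int := (-2, 1000000005)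

-- ===== CLAIM (what is proved, stated in full; the proofs are below) =====
def Claim_unchanged_XorBacktrack : Prop := ∀ (n : Int) (a : List Int) (multiset : List Int) (solutions : List (List Int)) (cur : Int), Dom_XorBacktrack n a multiset solutions cur → Pre_XorBacktrack n a multiset solutions cur → Spec_XorBacktrack n a multiset solutions cur (XorBacktrack n a multiset solutions cur)
def Claim_changed_XorBacktrack : Prop := Dom_XorBacktrack (pvDiffWitness_XorBacktrack.1) (pvDiffWitness_XorBacktrack.2.1) (pvDiffWitness_XorBacktrack.2.2.1) (pvDiffWitness_XorBacktrack.2.2.2.1) (pvDiffWitness_XorBacktrack.2.2.2.2) ∧ Pre_XorBacktrack (pvDiffWitness_XorBacktrack.1) (pvDiffWitness_XorBacktrack.2.1) (pvDiffWitness_XorBacktrack.2.2.1) (pvDiffWitness_XorBacktrack.2.2.2.1) (pvDiffWitness_XorBacktrack.2.2.2.2) ∧ D_XorBacktrack (pvDiffWitness_XorBacktrack.1) (pvDiffWitness_XorBacktrack.2.1) (pvDiffWitness_XorBacktrack.2.2.1) (pvDiffWitness_XorBacktrack.2.2.2.1) (pvDiffWitness_XorBacktrack.2.2.2.2) ∧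 XorBacktrack (pvDiffWitness_XorBacktrack.1) (pvDiffWitness_XorBacktrack.2.1) (pvDiffWitness_XorBacktrack.2.2.1) (pvDiffWitness_XorBacktrack.2.2.2.1) (pvDiffWitness_XorBacktrack.2.2.2.2) = pvDiffWitnessOut_XorBacktrack.1 ∧ XorBacktrack_alt (pvDiffWitness_XorBacktrack.1) (pvDiffWitness_XorBacktrack.2.1) (pvDiffWitness_XorBacktrack.2.2.1) (pvDiffWitness_XorBacktrack.2.2.2.1) (pvDiffWitness_XorBacktrack.2.2.2.2) = pvDiffWitnessOut_XorBacktrack.2 ∧ pvDiffWitnessOut_XorBacktrack.1 ≠ pvDiffWitnessOut_XorBacktrack.2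
def Claim_exact_XorBacktrack : Prop := ∀ (n : Int) (a : List Int) (multiset : List Int) (solutions : List (List Int)) (cur : Int), Dom_XorBacktrack n a multiset solutions cur → Pre_XorBacktrack n a multiset solutions cur → D_XorBacktrack n a multiset solutions cur → XorBacktrack n a multiset solutions cur ≠ XorBacktrack_alt n a multiset solutions cur

-- ===== LEMMAS AND PROOFS =====

lemma runBF_nil (a : List Int) (fuel : Nat) (sols : List (List Int)) (cur : Int) :
    runBF a fuel [] sols cur = cur := by
  cases fuel <;> simp [runBF]

lemma stackW_cons (a m : List Int) (st : List (List Int)) :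
    stackW a (m :: st) = (a.length + 2) ^ (a.length + 1 - m.length) + stackW a st := by
  simp [stackW]

lemma stackW_pop_lt (a m : List Int) (rest : List (List Int)) :
    stackW a rest < stackW a (m :: rest) := by
  have hp : 1 ≤ (a.length + 2) ^ (a.length + 1 - m.length) := Nat.one_le_pow _ _ (by omega)
  rw [stackW_cons]; omega

lemma stackW_push_lt (a m : List Int) (rest : List (List Int)) (h : m.length < a.length) :
    stackW a (a.map (fun x => m ++ [x]) ++ rest) < stackW a (m :: rest) := by
  simp only [stackW, List.map_append, List.sum_append, List.map_map, List.map_cons,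
    List.sum_cons, Function.comp_def, List.length_append, List.length_cons,
    List.length_nil, Nat.zero_add, List.map_const', List.sum_replicate, List.length_map,
    smul_eq_mul]
  have he : a.length + 1 - m.length = (a.length - m.length) + 1 := by omega
  have h2 : a.length + 1 - (m.length + 1) = a.length - m.length := by omega
  rw [he, h2, pow_succ]
  have hp : 1 ≤ (a.length + 2) ^ (a.length - m.length) := Nat.one_le_pow _ _ (by omega)
  nlinarith [hp]

lemma runBF_irrel (a : List Int) : ∀ (f1 f2 : Nat) (st : List (List Int))
    (sols : List (List Int)) (cur : Int), stackW a st < f1 → stackW a st < f2 →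
    runBF a f1 st sols cur = runBF a f2 st sols cur := by
  intro f1
  induction f1 with
  | zero => intro f2 st sols cur h1 _; exact absurd h1 (by omega)
  | succ f1 ih =>
    intro f2 st sols cur h1 h2
    match f2, st with
    | 0, st => exact absurd h2 (by omega)
    | f2 + 1, [] => simp [runBF]
    | f2 + 1, m :: rest =>
      simp only [runBF]
      by_cases hm : m.length < a.length
      · simp only [if_pos hm]
        have hlt := stackW_push_lt a m rest hm
        exact ih f2 _ _ _ (by omega) (by omega)
      · simp only [if_neg hm]
        have hlt := stackW_pop_lt a m rest
        exact ih f2 _ _ _ (by omega) (by omega)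

-- ---- characterization of the node check as the input property QualP ----

lemma replace_self_int (c : List Int) (x : Int) : c.replace x x = c := by
  induction c with
  | nil => rfl
  | cons a as ih =>
    by_cases h : x = a
    · simp [List.replace_cons, h]
    · simp [List.replace_cons, beq_false_of_ne h, ih]

lemma count_replace_same (c : List Int) (v : Int) (hv : v ∈ c) (hvS : v ≠ -1000000000) :
    (c.replace v (-1000000000)).count v + 1 = c.count v := by
  induction c with
  | nil => simp at hv
  | cons a as ih =>
    by_cases h : v = a
    · subst h
      have hr : (v :: as).replace v (-1000000000) = -1000000000 :: as := by
        simp [List.replace_cons]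
      rw [hr, List.count_cons, List.count_cons]
      simp [beq_false_of_ne (Ne.symm hvS)]
    · have hv' : v ∈ as := by
        rcases List.mem_cons.mp hv with h' | h'
        · exact absurd h' h
        · exact h'
      have hr : (a :: as).replace v (-1000000000) = a :: as.replace v (-1000000000) := by
        simp [List.replace_cons, beq_false_of_ne h]
      rw [hr, List.count_cons, List.count_cons]
      simp only [beq_false_of_ne (Ne.symm h), if_false]
      have := ih hv'
      omega

lemma count_replace_other (c : List Int) (v : Int) (hv : v ∈ c) (w : Int)
    (hwv : w ≠ v) (hwS : w ≠ -1000000000) :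
    (c.replace v (-1000000000)).count w = c.count w := by
  induction c with
  | nil => simp at hv
  | cons a as ih =>
    by_cases h : v = a
    · subst h
      have hr : (v :: as).replace v (-1000000000) = -1000000000 :: as := by
        simp [List.replace_cons]
      rw [hr, List.count_cons, List.count_cons]
      simp [beq_false_of_ne (Ne.symm hwS), beq_false_of_ne (Ne.symm hwv)]
    · have hv' : v ∈ as := by
        rcases List.mem_cons.mp hv with h' | h'
        · exact absurd h' h
        · exact h'
      have hr : (a :: as).replace v (-1000000000) = a :: as.replace v (-1000000000) := by
        simp [List.replace_cons, beq_false_of_ne h]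
      rw [hr, List.count_cons, List.count_cons, ih hv']

lemma mem_sent_replace (c : List Int) (v : Int) (hv : v ∈ c) :
    (-1000000000) ∈ c.replace v (-1000000000) := by
  induction c with
  | nil => simp at hv
  | cons a as ih =>
    by_cases h : v = a
    · simp [List.replace_cons, h]
    · have hv' : v ∈ as := by
        rcases List.mem_cons.mp hv with h' | h'
        · exact absurd h' h
        · exact h'
      simp [List.replace_cons, beq_false_of_ne h, ih hv']

lemma consumeP_iff : ∀ (m c : List Int), consumeP m c = true ↔
    ((∀ v ∈ m, v ≠ -1000000000 → m.count v ≤ c.count v) ∧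
     ((-1000000000) ∈ m → ((-1000000000) ∈ c ∨ m.head? ≠ some (-1000000000)))) := by
  intro m
  induction m with
  | nil => intro c; simp [consumeP]
  | cons v rest ih =>
    intro c
    rw [consumeP]
    by_cases hvS : v = -1000000000
    · subst hvS
      by_cases hS : (-1000000000 : Int) ∈ c
      · rw [if_pos (by simpa using hS), replace_self_int]
        rw [ih c]
        constructor
        · rintro ⟨hcnt, _⟩
          refine ⟨?_, fun _ => Or.inl hS⟩
          intro w hw hwS
          have hw' : w ∈ rest := by
            rcases List.mem_cons.mp hw with h' | h'
            · exact absurd h' hwS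
            · exact h'
          have h3 : List.count w ((-1000000000) :: rest) = rest.count w := by
            simp [List.count_cons, beq_false_of_ne (fun h => hwS h.symm)]
          rw [h3]
          exact hcnt w hw' hwS
        · rintro ⟨hcnt, _⟩
          refine ⟨?_, fun _ => Or.inl hS⟩
          intro w hw hwS
          have h2 := hcnt w (List.mem_cons_of_mem _ hw) hwS
          have h3 : List.count w ((-1000000000) :: rest) = rest.count w := by
            simp [List.count_cons, beq_false_of_ne (fun h => hwS h.symm)]
          rw [h3] at h2
          exact h2
      · rw [if_neg (by simpa using hS)]
        constructor
        · intro h; exact absurd h (by simp)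
        · rintro ⟨_, hs⟩
          rcases hs List.mem_cons_self with h | h
          · exact absurd h hS
          · simp at h
    · by_cases hv : v ∈ c
      · rw [if_pos (by simpa using hv), ih (c.replace v (-1000000000))]
        have hsent := mem_sent_replace c v hv
        constructor
        · rintro ⟨hcnt, _⟩
          refine ⟨?_, fun _ => Or.inr (by simpa using hvS)⟩
          intro w hw hwS
          by_cases hwv : w = v
          · subst hwv
            have h1 := count_replace_same c w hv hwS
            have h2 : rest.count w ≤ (c.replace w (-1000000000)).count w := by
              by_cases hmem : w ∈ rest
              · exact hcnt w hmem hwS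
              · simp [List.count_eq_zero_of_not_mem hmem]
            have h3 : List.count w (w :: rest) = rest.count w + 1 := by
              simp [List.count_cons]
            rw [h3]
            omega
          · have hw' : w ∈ rest := by
              rcases List.mem_cons.mp hw with h' | h'
              · exact absurd h' hwv
              · exact h'
            have h1 := count_replace_other c v hv w hwv hwS
            have h2 := hcnt w hw' hwS
            have h3 : List.count w (v :: rest) = rest.count w := by
              simp [List.count_cons, beq_false_of_ne (Ne.symm hwv)]
            rw [h3]
            omega
        · rintro ⟨hcnt, _⟩
          refine ⟨?_, fun _ => Or.inl hsent⟩
          intro w hw hwS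
          by_cases hwv : w = v
          · subst hwv
            have h1 := count_replace_same c w hv hwS
            have h2 := hcnt w List.mem_cons_self hwS
            have h3 : List.count w (w :: rest) = rest.count w + 1 := by
              simp [List.count_cons]
            rw [h3] at h2
            omega
          · have h1 := count_replace_other c v hv w hwv hwS
            have h2 := hcnt w (List.mem_cons_of_mem _ hw) hwS
            have h3 : List.count w (v :: rest) = rest.count w := by
              simp [List.count_cons, beq_false_of_ne (Ne.symm hwv)]
            rw [h3] at h2
            omega
      · rw [if_neg (by simpa using hv)]
        constructor
        · intro h; exact absurd h (by simp)
        · rintro ⟨hcnt, _⟩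
          have := hcnt v List.mem_cons_self hvS
          rw [List.count_cons, List.count_eq_zero_of_not_mem hv] at this
          simp at this

lemma isPrimeAux_iff (val : Int) : ∀ (fuel : Nat) (k : Int),
    isPrimeAux val fuel k = true ↔ ∀ i : Nat, i < fuel → PySem.Int.mod val (k + i) ≠ 0 := by
  intro fuel
  induction fuel with
  | zero => exact fun k => ⟨fun _ i hi => by omega, fun _ => rfl⟩
  | succ f ih =>
    intro k
    rw [isPrimeAux]
    by_cases h : PySem.Int.mod val k == 0
    · rw [if_pos h]
      constructor
      · intro hc; simp at hc
      · intro hall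
        exact absurd (by simpa using (hall 0 (by omega))) (by simpa using h)
    · rw [if_neg h, ih (k + 1)]
      constructor
      · intro hall i hi
        match i with
        | 0 => simpa using fun hc => h (by simpa using hc)
        | i + 1 =>
          have := hall i (by omega)
          rwa [show k + 1 + (i : Int) = k + ((i : Nat) + 1 : Nat) by push_cast; ring] at this
      · intro hall i hi
        have := hall (i + 1) (by omega)
        rwa [show k + ((i : Nat) + 1 : Nat) = k + 1 + (i : Int) by push_cast; ring] at this

lemma isPrimeP_iff (val : Int) : isPrimeP val = true ↔ 2 ≤ val ∧ Nat.Prime val.toNat := by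
  unfold isPrimeP
  by_cases h2 : val < 2
  · rw [if_pos h2]
    constructor
    · intro hc; simp at hc
    · rintro ⟨hge, _⟩; omega
  · rw [if_neg h2, isPrimeAux_iff]
    push_neg at h2
    have hval : val = (val.toNat : Int) := (Int.toNat_of_nonneg (by omega)).symm
    have hmod : ∀ j : Int, 0 < j → (PySem.Int.mod val j = 0 ↔ j ∣ val) := by
      intro j hj
      rw [PySem.Int.mod_eq_emod_of_pos hj]
      exact ⟨Int.dvd_of_emod_eq_zero, Int.emod_eq_zero_of_dvd⟩
    rw [Nat.prime_def_lt']
    constructor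
    · intro hall
      refine ⟨h2, by omega, ?_⟩
      intro mm hm2 hmlt hdvd
      have hi : (mm - 2) < (val - 2).toNat := by omega
      apply hall (mm - 2) hi
      rw [hmod _ (by push_cast; omega)]
      rw [show (2 : Int) + ((mm - 2 : Nat) : Int) = (mm : Int) by push_cast; omega, hval]
      exact_mod_cast hdvd
    · rintro ⟨_, _, hall⟩ i hi
      intro hc
      rw [hmod _ (by push_cast; omega)] at hc
      refine hall (2 + i) (by omega) (by omega) ?_
      rw [hval] at hc
      exact_mod_cast hc

lemma xorIsPrimeP_iff (sols : List (List Int)) (m a : List Int) :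
    xorIsPrimeP sols m a = true ↔
      ((∀ e ∈ sols, ¬ List.Perm e m) ∧
       (∀ v ∈ m, v ≠ -1000000000 → m.count v ≤ a.count v) ∧
       ((-1000000000) ∈ m → ((-1000000000) ∈ a ∨ m.head? ≠ some (-1000000000))) ∧
       2 ≤ m.foldl (fun x v => PySem.Int.bxor x v) 0 ∧
       Nat.Prime (m.foldl (fun x v => PySem.Int.bxor x v) 0).toNat) := by
  unfold xorIsPrimeP
  by_cases h1 : sols.any (fun e => e.isPerm m)
  · rw [if_pos h1]
    obtain ⟨e, he, hp⟩ := List.any_eq_true.mp h1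
    constructor
    · intro hc; simp at hc
    · rintro ⟨hall, _⟩
      exact absurd (List.isPerm_iff.mp hp) (hall e he)
  · rw [if_neg h1]
    have hperm : ∀ e ∈ sols, ¬ List.Perm e m := by
      intro e he hp
      exact h1 (List.any_eq_true.mpr ⟨e, he, List.isPerm_iff.mpr hp⟩)
    by_cases h2 : consumeP m a
    · rw [if_pos h2, isPrimeP_iff]
      obtain ⟨hc1, hc2⟩ := (consumeP_iff m a).mp h2
      constructor
      · intro hp; exact ⟨hperm, hc1, hc2, hp.1, hp.2⟩
      · rintro ⟨_, _, _, hx1, hx2⟩; exact ⟨hx1, hx2⟩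
    · rw [if_neg h2]
      constructor
      · intro hc; simp at hc
      · rintro ⟨_, hc1, hc2, _⟩
        exact absurd ((consumeP_iff m a).mpr ⟨hc1, hc2⟩) h2

lemma qual_iff (a m : List Int) (sols : List (List Int)) :
    QualP a m sols ↔ (1 ≤ m.length ∧ xorIsPrimeP sols m a = true) := by
  unfold QualP
  rw [xorIsPrimeP_iff]
  constructor
  · rintro ⟨hne, h⟩
    exact ⟨by cases m <;> simp_all, h⟩
  · rintro ⟨hlen, h⟩
    exact ⟨by cases m <;> simp_all, h⟩

-- the node check of both ports (nested ifs in A, one conjunction in B), abstracted: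
-- the new solutions list and the cur increment (0 or 1) are independent of cur
lemma node_ex (a m : List Int) (sols : List (List Int)) :
    ∃ (inc0 : Int) (sols0 : List (List Int)),
      ((QualP a m sols ∧ inc0 = 1) ∨ (¬ QualP a m sols ∧ inc0 = 0)) ∧ ∀ cur : Int,
      (if 1 ≤ m.length then
        (if xorIsPrimeP sols m a then (sols ++ [m], cur + 1) else (sols, cur))
       else (sols, cur)) = (sols0, cur + inc0) ∧
      (if 1 ≤ m.length ∧ xorIsPrimeP sols m a = true then (sols ++ [m], cur + 1)
       else (sols, cur)) = (sols0, cur + inc0) := by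
  by_cases h1 : 1 ≤ m.length <;> by_cases h2 : xorIsPrimeP sols m a
  · exact ⟨1, sols ++ [m], Or.inl ⟨(qual_iff a m sols).mpr ⟨h1, h2⟩, rfl⟩,
      fun cur => by simp [h1, h2]⟩
  · exact ⟨0, sols, Or.inr ⟨fun hq => h2 ((qual_iff a m sols).mp hq).2, rfl⟩,
      fun cur => by simp [h1, h2]⟩
  · exact ⟨0, sols, Or.inr ⟨fun hq => h1 ((qual_iff a m sols).mp hq).1, rfl⟩,
      fun cur => by simp [h1, h2]⟩
  · exact ⟨0, sols, Or.inr ⟨fun hq => h1 ((qual_iff a m sols).mp hq).1, rfl⟩,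
      fun cur => by simp [h1, h2]⟩

-- base node (multiset already as long as a): one check, no recursion, no mod in A
lemma base_case (a m : List Int) (hm : m.length = a.length) (sols : List (List Int)) :
    ∃ (inc : Int) (sols' : List (List Int)),
      ((QualP a m sols ∧ inc = 1) ∨ (¬ QualP a m sols ∧ inc = 0)) ∧
      (∀ (rest : List (List Int)) (cur : Int) (fuel : Nat), stackW a (m :: rest) < fuel →
          runBF a fuel (m :: rest) sols cur = runBF a fuel rest sols' (cur + inc)) ∧
      (∀ (cur : Int) (fuel : Nat), a.length - m.length < fuel →
          goA a fuel m sols cur =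
            (if m.length = a.length then cur + inc
             else PySem.Int.mod (cur + inc) 1000000007, sols')) := by
  obtain ⟨inc0, sols0, h01, hnode⟩ := node_ex a m sols
  refine ⟨inc0, sols0, h01, ?_, ?_⟩
  · intro rest cur fuel hf
    match fuel with
    | 0 => exact absurd hf (by omega)
    | fuel + 1 =>
      have hlt := stackW_pop_lt a m rest
      have step : runBF a (fuel + 1) (m :: rest) sols cur
          = runBF a fuel rest sols0 (cur + inc0) := by
        conv_lhs => rw [runBF]
        rw [(hnode cur).2, if_neg (by omega : ¬ m.length < a.length)]
      rw [step]
      exact runBF_irrel a fuel (fuel + 1) rest sols0 (cur + inc0) (by omega) (by omega)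
  · intro cur fuel hf
    rw [goA.eq_def]
    simp only [(hnode cur).1, if_pos hm]

-- the main simulation lemma: processing one frame of B's stack equals one call of A's
-- recursion (the cur offset inc and the new solutions list are independent of cur;
-- A's result is B's cur + inc, modded at non-base nodes).
lemma runB_goA (a : List Int) : ∀ (k : Nat) (m : List Int), m.length ≤ a.length →
    a.length - m.length ≤ k →
    ∀ (sols : List (List Int)), ∃ (inc : Int) (sols' : List (List Int)),
      (∀ (rest : List (List Int)) (cur : Int) (fuel : Nat), stackW a (m :: rest) < fuel →
          runBF a fuel (m :: rest) sols cur = runBF a fuel rest sols' (cur + inc)) ∧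
      (∀ (cur : Int) (fuel : Nat), a.length - m.length < fuel →
          goA a fuel m sols cur =
            (if m.length = a.length then cur + inc
             else PySem.Int.mod (cur + inc) 1000000007, sols')) := by
  intro k
  induction k with
  | zero =>
    intro m hle hk sols
    obtain ⟨inc, sols', _, hrun, hgo⟩ := base_case a m (by omega) sols
    exact ⟨inc, sols', hrun, hgo⟩
  | succ k ih =>
    intro m hle hk sols
    by_cases hm : m.length = a.length
    · obtain ⟨inc, sols', _, hrun, hgo⟩ := base_case a m hm sols
      exact ⟨inc, sols', hrun, hgo⟩
    · have hlt : m.length < a.length := by omega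
      obtain ⟨inc0, sols0, _, hnode⟩ := node_ex a m sols
      -- chain over a list of children m ++ [x]
      have chain : ∀ (xs : List Int) (sols1 : List (List Int)),
          ∃ (inc : Int) (sols' : List (List Int)),
            (∀ (rest : List (List Int)) (cur : Int) (fuel : Nat),
                stackW a (xs.map (fun x => m ++ [x]) ++ rest) < fuel →
                runBF a fuel (xs.map (fun x => m ++ [x]) ++ rest) sols1 cur =
                  runBF a fuel rest sols' (cur + inc)) ∧
            (∀ (cur : Int) (fuel : Nat), a.length - (m.length + 1) < fuel →
                (xs.foldl (fun (st : Int × List (List Int)) x =>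
                    goA a fuel (m ++ [x]) st.2 st.1) (cur, sols1)).2 = sols' ∧
                Int.ModEq 1000000007
                  ((xs.foldl (fun (st : Int × List (List Int)) x =>
                    goA a fuel (m ++ [x]) st.2 st.1) (cur, sols1)).1) (cur + inc)) := by
        intro xs
        induction xs with
        | nil =>
          intro sols1
          exact ⟨0, sols1, fun rest cur fuel hf => by simp,
            fun cur fuel hf => by simp [Int.ModEq.refl]⟩
        | cons x xs ihx =>
          intro sols1
          obtain ⟨inc1, sols1', h1run, h1go⟩ :=
            ih (m ++ [x]) (by simp; omega) (by simp; omega) sols1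
          obtain ⟨inc2, sols2, h2run, h2go⟩ := ihx sols1'
          refine ⟨inc1 + inc2, sols2, ?_, ?_⟩
          · intro rest cur fuel hf
            simp only [List.map_cons, List.cons_append] at hf ⊢
            rw [h1run (xs.map (fun x => m ++ [x]) ++ rest) cur fuel hf]
            rw [stackW_cons] at hf
            rw [h2run rest (cur + inc1) fuel (by omega), add_assoc]
          · intro cur fuel hf
            simp only [List.foldl_cons]
            rw [h1go cur fuel (by simpa using hf)]
            obtain ⟨hs2, hmod2⟩ := h2go _ fuel hf
            refine ⟨hs2, ?_⟩
            have hG : Int.ModEq 1000000007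
                (if (m ++ [x]).length = a.length then cur + inc1
                 else PySem.Int.mod (cur + inc1) 1000000007) (cur + inc1) := by
              by_cases hb : (m ++ [x]).length = a.length
              · simp [hb]
              · simp only [if_neg hb,
                  PySem.Int.mod_eq_emod_of_pos (by norm_num : (0:Int) < 1000000007)]
                exact Int.emod_emod_of_dvd _ dvd_rfl
            have := hmod2.trans (Int.ModEq.add_right inc2 hG)
            rwa [add_assoc] at this
      obtain ⟨inc, sols', hcrun, hcgo⟩ := chain a sols0
      refine ⟨inc0 + inc, sols', ?_, ?_⟩
      · intro rest cur fuel hf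
        match fuel with
        | 0 => exact absurd hf (by omega)
        | fuel + 1 =>
          have hpush := stackW_push_lt a m rest hlt
          have hpop := stackW_pop_lt a m rest
          have step : runBF a (fuel + 1) (m :: rest) sols cur
              = runBF a fuel (a.map (fun x => m ++ [x]) ++ rest) sols0 (cur + inc0) := by
            conv_lhs => rw [runBF]
            rw [(hnode cur).2, if_pos hlt]
          rw [step, hcrun rest (cur + inc0) fuel (by omega),
            runBF_irrel a fuel (fuel + 1) rest sols' _ (by omega) (by omega), add_assoc]
      · intro cur fuel hf
        match fuel with
        | 0 => exact absurd hf (by omega)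
        | fuel + 1 =>
          rw [goA.eq_def]
          simp only [(hnode cur).1, if_neg hm]
          obtain ⟨hs, hmod⟩ := hcgo (cur + inc0) fuel (by omega)
          refine Prod.ext ?_ (by simpa using hs)
          simp only
          rw [PySem.Int.mod_eq_emod_of_pos (by norm_num : (0:Int) < 1000000007),
            PySem.Int.mod_eq_emod_of_pos (by norm_num : (0:Int) < 1000000007)]
          have := hmod
          rw [← add_assoc]
          exact this

lemma mod_range (x : Int) : 0 ≤ PySem.Int.mod x 1000000007 ∧ PySem.Int.mod x 1000000007 < 1000000007 := by
  rw [PySem.Int.mod_eq_emod_of_pos (by norm_num : (0:Int) < 1000000007)]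
  exact ⟨Int.emod_nonneg x (by norm_num), Int.emod_lt_of_pos x (by norm_num)⟩

theorem XorBacktrack_spec : Claim_unchanged_XorBacktrack := by
  intro n a m sols cur _ hpre hnd
  unfold XorBacktrack XorBacktrack_alt
  unfold D_XorBacktrack at hnd
  rcases hpre with rfl | hle
  · cases m with
    | nil =>
      have hq : ¬ QualP [] [] sols := fun h => h.1 rfl
      have hcur : 0 ≤ cur ∧ cur < 1000000007 := by
        by_contra h
        exact hnd ⟨rfl, fun hQ => absurd hQ hq, fun _ => by omega⟩
      simp [goA.eq_def, runBF, stackW,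
        PySem.Int.mod_eq_emod_of_pos (by norm_num : (0:Int) < 1000000007)]
      exact (Int.emod_eq_of_lt hcur.1 (by omega)).symm
    | cons v t =>
      have hx : xorIsPrimeP sols (v :: t) [] = false := by
        unfold xorIsPrimeP consumeP
        simp
      simp [goA.eq_def, runBF, stackW, hx]
  · by_cases hm : m.length = a.length
    · obtain ⟨inc, sols', hqc, hrun, hgo⟩ := base_case a m hm sols
      have hcur : 0 ≤ cur + inc ∧ cur + inc < 1000000007 := by
        rcases hqc with ⟨hQ, rfl⟩ | ⟨hQ, rfl⟩
        · by_contra h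
          exact hnd ⟨hm, fun _ => by omega, fun hn => absurd hQ hn⟩
        · by_contra h
          exact hnd ⟨hm, fun hQ' => absurd hQ' hQ, fun _ => by omega⟩
      have h1 : (goA a (a.length + 1) m sols cur).1 = cur + inc := by
        rw [hgo cur (a.length + 1) (by omega)]; simp [hm]
      have h2 : runBF a (stackW a [m] + 1) [m] sols cur = cur + inc := by
        rw [hrun [] cur _ (by omega), runBF_nil]
      rw [h1, h2, PySem.Int.mod_eq_emod_of_pos (by norm_num : (0:Int) < 1000000007)]
      exact (Int.emod_eq_of_lt hcur.1 hcur.2).symm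
    · obtain ⟨inc, sols', hrun, hgo⟩ := runB_goA a (a.length - m.length) m hle le_rfl sols
      have h1 : (goA a (a.length + 1) m sols cur).1 =
          PySem.Int.mod (cur + inc) 1000000007 := by
        rw [hgo cur (a.length + 1) (by omega)]; simp [hm]
      have h2 : runBF a (stackW a [m] + 1) [m] sols cur = cur + inc := by
        rw [hrun [] cur _ (by omega), runBF_nil]
      rw [h1, h2]

theorem XorBacktrack_changed : Claim_changed_XorBacktrack := by
  unfold Claim_changed_XorBacktrack; decide

theorem XorBacktrack_tight : Claim_exact_XorBacktrack := by
  intro n a m sols cur _ _ hd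
  unfold D_XorBacktrack at hd
  obtain ⟨hm, hq1, hq0⟩ := hd
  obtain ⟨inc, sols', hqc, hrun, hgo⟩ := base_case a m hm sols
  have hA : XorBacktrack n a m sols cur = cur + inc := by
    unfold XorBacktrack
    rw [hgo cur (a.length + 1) (by omega)]; simp [hm]
  have hB : XorBacktrack_alt n a m sols cur = PySem.Int.mod (cur + inc) 1000000007 := by
    unfold XorBacktrack_alt
    rw [hrun [] cur _ (by omega), runBF_nil]
  have hout : cur + inc < 0 ∨ 1000000007 ≤ cur + inc := by
    rcases hqc with ⟨hQ, rfl⟩ | ⟨hQ, rfl⟩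
    · rcases hq1 hQ with h | h
      · left; omega
      · right; omega
    · rcases hq0 hQ with h | h
      · left; omega
      · right; omega
  rw [hA, hB]
  have := mod_range (cur + inc)
  intro heq
  omega
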